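-- pv_equiv track=rewrite | github.com/alopez3006/snipara-mcp-server | src/engine/scoring/keyword_scorer.py | _tokens_within_window
-- ===== SOURCE A (Python) =====
-- def _tokens_within_window(tokens: list[str], left: str, right: str, window: int) -> bool:
--     for index, token in enumerate(tokens):
--         if not token.startswith(left):
--             continue
--         for offset in range(1, window + 1):
--             if index + offset >= len(tokens):
--                 break
--             if tokens[index + offset].startswith(right):
--                 return True
--     return False
-- ===== SOURCE B (Python) =====
-- def _tokens_within_window(tokens: list[str], left: str, right: str, window: int) -> bool:
--     last_left = None
--     for index, token in enumerate(tokens):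
--         if token.startswith(right) and last_left is not None and index - last_left <= window:
--             return True
--         if token.startswith(left):
--             last_left = index
--     return False
-- ===== Notes on version B (the rewrite author's own statement) =====
-- stated objective: alternative
-- what changed: Replaced the nested look-ahead scan (each left-prefixed token probes up to `window` following tokens) by a single backward-looking pass that remembers the index of the most recent left-prefixed token and, at each right-prefixed token, checks the distance to it.
import Mathlib
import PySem

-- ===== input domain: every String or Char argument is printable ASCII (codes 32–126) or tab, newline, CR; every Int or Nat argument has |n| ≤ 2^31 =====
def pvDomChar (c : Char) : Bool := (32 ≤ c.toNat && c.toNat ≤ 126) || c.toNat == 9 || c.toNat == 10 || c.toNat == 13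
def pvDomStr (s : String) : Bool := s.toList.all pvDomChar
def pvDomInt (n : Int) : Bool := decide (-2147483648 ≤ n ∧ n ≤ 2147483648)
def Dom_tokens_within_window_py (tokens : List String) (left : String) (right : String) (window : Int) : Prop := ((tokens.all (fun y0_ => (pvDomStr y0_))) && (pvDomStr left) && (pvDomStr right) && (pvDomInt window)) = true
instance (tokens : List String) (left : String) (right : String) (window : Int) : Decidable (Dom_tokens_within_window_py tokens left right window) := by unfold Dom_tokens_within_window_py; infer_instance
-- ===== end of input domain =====

-- B replaces A's nested look-ahead scan by one backward-looking pass remembering the last left-prefixed index (objective: alternative).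

-- ===== PORT A =====
-- inner `for offset in range(1, window+1)` loop, with its `break` and early `return True`
def pvInnerA (tokens : List String) (right : String) (index : Int) : List Int → Bool
  | [] => false
  | o :: rest =>
    if (tokens.length : Int) ≤ index + o then false          -- break
    else if PySem.Str.startswith (PySem.List.pyGetD tokens (index + o) "") right then true
    else pvInnerA tokens right index rest

-- outer `for index, token in enumerate(tokens)` loop
def pvOuterA (tokens : List String) (left right : String) (window : Int) : List (Int × String) → Bool
  | [] => false
  | (i, t) :: rest =>
    if ¬ PySem.Str.startswith t left then pvOuterA tokens left right window rest
    else if pvInnerA tokens right i (PySem.List.pyRange 1 (window + 1) 1) then true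
    else pvOuterA tokens left right window rest

def tokens_within_window_py (tokens : List String) (left : String) (right : String) (window : Int) : Bool :=
  pvOuterA tokens left right window (PySem.List.enumerate tokens 0)

-- ===== PORT B =====
-- single pass: `last_left` is the index of the most recent left-prefixed token seen so far
def pvLoopB (left right : String) (window : Int) : List (Int × String) → Option Int → Bool
  | [], _ => false
  | (i, t) :: rest, last =>
    if PySem.Str.startswith t right ∧ (∃ j, last = some j ∧ i - j ≤ window) then true
    else pvLoopB left right window rest (if PySem.Str.startswith t left then some i else last)

def tokens_within_window_py_alt (tokens : List String) (left : String) (right : String) (window : Int) : Bool :=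
  pvLoopB left right window (PySem.List.enumerate tokens 0) none

-- ===== PRECONDITION & SPEC =====
def Spec_tokens_within_window_py (tokens : List String) (left : String) (right : String) (window : Int) (out : Bool) : Prop := out = tokens_within_window_py_alt tokens left right window
instance (tokens : List String) (left : String) (right : String) (window : Int) (out : Bool) : Decidable (Spec_tokens_within_window_py tokens left right window out) := by unfold Spec_tokens_within_window_py; infer_instance

-- ===== CLAIM (what is proved, stated in full; the proofs are below) =====
def Claim_equal_tokens_within_window_py : Prop := ∀ (tokens : List String) (left : String) (right : String) (window : Int), Dom_tokens_within_window_py tokens left right window → Spec_tokens_within_window_py tokens left right window (tokens_within_window_py tokens left right window)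

-- ===== LEMMAS AND PROOFS =====

-- the common specification: a left-prefixed token at m is followed, within `window`, by a right-prefixed token at k
def pvPairSpec (tokens : List String) (left right : String) (window : Int) : Prop :=
  ∃ (k : Nat) (hk : k < tokens.length), PySem.Str.startswith tokens[k] right = true ∧
    ∃ (m : Nat) (hm : m < k), PySem.Str.startswith (tokens[m]'(Nat.lt_trans hm hk)) left = true ∧
      (k : Int) - m ≤ window

lemma pvInnerA_iff (tokens : List String) (right : String) (index : Int) :
    ∀ (n : Nat) (a : Int),
      pvInnerA tokens right index (PySem.List.pyRange a (a + n) 1) = true ↔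
        ∃ o : Int, a ≤ o ∧ o < a + n ∧ index + o < tokens.length ∧
          PySem.Str.startswith (PySem.List.pyGetD tokens (index + o) "") right = true := by
  intro n
  induction n with
  | zero =>
    intro a
    rw [PySem.List.pyRange_one_eq_nil (by omega)]
    simp [pvInnerA]
    omega
  | succ n ih =>
    intro a
    rw [PySem.List.pyRange_one_cons (by omega : a < a + (n + 1 : Nat))]
    show pvInnerA tokens right index (a :: PySem.List.pyRange (a + 1) (a + (n + 1 : Nat)) 1) = true ↔ _
    have hrw : (a + 1) + (n : Int) = a + ((n + 1 : Nat) : Int) := by push_cast; ring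
    unfold pvInnerA
    by_cases hlen : (tokens.length : Int) ≤ index + a
    · simp only [if_pos hlen]
      constructor
      · intro h; exact absurd h (by simp)
      · rintro ⟨o, hao, _, hol, _⟩; omega
    · simp only [if_neg hlen]
      by_cases hsw : PySem.Str.startswith (PySem.List.pyGetD tokens (index + a) "") right = true
      · simp only [if_pos hsw]
        constructor
        · intro _; exact ⟨a, le_refl _, by omega, by omega, hsw⟩
        · intro _; trivial
      · simp only [if_neg hsw]
        rw [← hrw, ih (a + 1)]
        constructor
        · rintro ⟨o, h1, h2, h3, h4⟩; exact ⟨o, by omega, by omega, h3, h4⟩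
        · rintro ⟨o, h1, h2, h3, h4⟩
          refine ⟨o, by_contra fun hno => ?_, by omega, h3, h4⟩
          have : o = a := by omega
          subst this; exact hsw h4
      
lemma pvOuterA_iff (tokens : List String) (left right : String) (window : Int) :
    ∀ (ps : List (Int × String)),
      pvOuterA tokens left right window ps = true ↔
        ∃ p ∈ ps, PySem.Str.startswith p.2 left = true ∧
          pvInnerA tokens right p.1 (PySem.List.pyRange 1 (window + 1) 1) = true := by
  intro ps
  induction ps with
  | nil => simp [pvOuterA]
  | cons p rest ih =>
    obtain ⟨i, t⟩ := p
    unfold pvOuterA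
    by_cases h1 : PySem.Str.startswith t left = true
    · simp only [if_neg (not_not_intro h1)]
      by_cases h2 : pvInnerA tokens right i (PySem.List.pyRange 1 (window + 1) 1) = true
      · simp only [if_pos h2]
        constructor
        · intro _; exact ⟨(i, t), List.mem_cons_self .., h1, h2⟩
        · intro _; trivial
      · simp only [if_neg h2, ih]
        constructor
        · rintro ⟨p, hp, hh⟩; exact ⟨p, List.mem_cons_of_mem _ hp, hh⟩
        · rintro ⟨p, hp, hh⟩
          rcases List.mem_cons.mp hp with rfl | hp
          · exact absurd hh.2 h2
          · exact ⟨p, hp, hh⟩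
    · simp only [if_pos h1, ih]
      constructor
      · rintro ⟨p, hp, hh⟩; exact ⟨p, List.mem_cons_of_mem _ hp, hh⟩
      · rintro ⟨p, hp, hh⟩
        rcases List.mem_cons.mp hp with rfl | hp
        · exact absurd hh.1 h1
        · exact ⟨p, hp, hh⟩

lemma pvA_iff (tokens : List String) (left right : String) (window : Int) :
    tokens_within_window_py tokens left right window = true ↔
      pvPairSpec tokens left right window := by
  unfold tokens_within_window_py
  rw [pvOuterA_iff]
  by_cases hw : window ≤ 0
  · rw [PySem.List.pyRange_one_eq_nil (by omega)]
    constructor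
    · rintro ⟨p, _, _, h⟩; exact absurd h (by simp [pvInnerA])
    · rintro ⟨k, hk, _, m, hm1, _, hm3⟩; omega
  · have hto : window + 1 = 1 + ((window.toNat : Int)) := by omega
    rw [hto]
    constructor
    · rintro ⟨p, hp, hl, hinner⟩
      rw [PySem.List.mem_enumerate_iff] at hp
      obtain ⟨k, hk, rfl⟩ := hp
      rw [pvInnerA_iff] at hinner
      obtain ⟨o, ho1, ho2, ho3, ho4⟩ := hinner
      simp only [zero_add] at hl ho3 ho4 ⊢
      refine ⟨((k : Int) + o).toNat, by omega, ?_, k, by omega, hl, by omega⟩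
      rwa [PySem.List.pyGetD_eq_getElem tokens "" (by omega) ho3] at ho4
    · rintro ⟨k, hk, hr, m, hm, hm2, hm3⟩
      refine ⟨((m : Int), tokens[m]'(by omega)), ?_, hm2, ?_⟩
      · rw [PySem.List.mem_enumerate_iff]
        exact ⟨m, by omega, by simp⟩
      · rw [pvInnerA_iff]
        refine ⟨(k : Int) - m, by omega, by omega, by omega, ?_⟩
        have heq : (m : Int) + ((k : Int) - m) = (k : Int) := by omega
        rw [heq, PySem.List.pyGetD_eq_getElem tokens "" (by omega) (by omega)]
        simpa using hr

lemma pvLoopB_iff (left right : String) (window : Int) :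
    ∀ (xs : List String) (s : Int) (last : Option Int),
      (∀ j, last = some j → j ≤ s) →
      (pvLoopB left right window (PySem.List.enumerate xs s) last = true ↔
        ∃ (k : Nat) (hk : k < xs.length), PySem.Str.startswith xs[k] right = true ∧
          ((∃ j, last = some j ∧ s + (k : Int) - j ≤ window) ∨
           (∃ (m : Nat) (hm : m < k), PySem.Str.startswith (xs[m]'(Nat.lt_trans hm hk)) left = true ∧ (k : Int) - m ≤ window))) := by
  intro xs
  induction xs with
  | nil =>
    intro s last _
    rw [PySem.List.enumerate_nil]
    simp [pvLoopB]
  | cons x xs ih =>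
    intro s last hinv
    rw [PySem.List.enumerate_cons]
    unfold pvLoopB
    by_cases hc : PySem.Str.startswith x right = true ∧ ∃ j, last = some j ∧ s - j ≤ window
    · simp only [if_pos hc]
      obtain ⟨hcr, j, hj, hjw⟩ := hc
      constructor
      · intro _
        refine ⟨0, ?_, ?_, Or.inl ⟨j, hj, ?_⟩⟩
        · first
          | omega
          | (simp only [List.length_cons] at *; omega)
        · simpa using hcr
        · first
          | omega
          | (simp only [List.length_cons] at *; omega)
      · intro _; trivial
    · simp only [if_neg hc]
      by_cases hl : PySem.Str.startswith x left = true
      · simp only [if_pos hl]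
        rw [ih (s + 1) (some s) (by rintro j ⟨rfl⟩; omega)]
        constructor
        · rintro ⟨k, hk, hr, hd⟩
          refine ⟨k + 1, ?_, ?_, ?_⟩
          · first
            | omega
            | (simp only [List.length_cons] at *; omega)
          · simpa using hr
          rcases hd with ⟨j, hj, hjw⟩ | ⟨m, hm1, hm2, hm3⟩
          · obtain ⟨rfl⟩ := hj
            refine Or.inr ⟨0, ?_, ?_, ?_⟩
            · first
              | omega
              | (simp only [List.length_cons] at *; omega)
            · simpa using hl
            · first
              | omega
              | (simp only [List.length_cons] at *; omega)
          · refine Or.inr ⟨m + 1, ?_, ?_, ?_⟩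
            · first
              | omega
              | (simp only [List.length_cons] at *; omega)
            · simpa using hm2
            · first
              | omega
              | (simp only [List.length_cons] at *; omega)
        · rintro ⟨k, hk, hr, hd⟩
          cases k with
          | zero =>
            exfalso
            rcases hd with ⟨j, hj, hjw⟩ | ⟨m, hm1, _, _⟩
            · exact hc ⟨by simpa using hr, j, hj, by first | omega | (simp only [List.length_cons] at *; omega)⟩
            · first
              | omega
              | (simp only [List.length_cons] at *; omega)
          | succ k =>
            refine ⟨k, ?_, ?_, ?_⟩
            · simp only [List.length_cons] at hk
              first
              | omega
              | (simp only [List.length_cons] at *; omega)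
            · simpa using hr
            rcases hd with ⟨j, hj, hjw⟩ | ⟨m, hm1, hm2, hm3⟩
            · have hjs : j ≤ s := hinv j hj
              refine Or.inl ⟨s, rfl, ?_⟩
              first
              | omega
              | (simp only [List.length_cons] at *; omega)
            · cases m with
              | zero =>
                refine Or.inl ⟨s, rfl, ?_⟩
                first
                | omega
                | (simp only [List.length_cons] at *; omega)
              | succ m =>
                refine Or.inr ⟨m, ?_, ?_, ?_⟩
                · first
                  | omega
                  | (simp only [List.length_cons] at *; omega)
                · simpa using hm2
                · first
                  | omega
                  | (simp only [List.length_cons] at *; omega)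
      · simp only [if_neg hl]
        rw [ih (s + 1) last (by intro j hj; have := hinv j hj; omega)]
        constructor
        · rintro ⟨k, hk, hr, hd⟩
          refine ⟨k + 1, ?_, ?_, ?_⟩
          · first
            | omega
            | (simp only [List.length_cons] at *; omega)
          · simpa using hr
          rcases hd with ⟨j, hj, hjw⟩ | ⟨m, hm1, hm2, hm3⟩
          · refine Or.inl ⟨j, hj, ?_⟩
            first
            | omega
            | (simp only [List.length_cons] at *; omega)
          · refine Or.inr ⟨m + 1, ?_, ?_, ?_⟩
            · first
              | omega
              | (simp only [List.length_cons] at *; omega)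
            · simpa using hm2
            · first
              | omega
              | (simp only [List.length_cons] at *; omega)
        · rintro ⟨k, hk, hr, hd⟩
          cases k with
          | zero =>
            exfalso
            rcases hd with ⟨j, hj, hjw⟩ | ⟨m, hm1, _, _⟩
            · exact hc ⟨by simpa using hr, j, hj, by first | omega | (simp only [List.length_cons] at *; omega)⟩
            · first
              | omega
              | (simp only [List.length_cons] at *; omega)
          | succ k =>
            refine ⟨k, ?_, ?_, ?_⟩
            · simp only [List.length_cons] at hk
              first
              | omega
              | (simp only [List.length_cons] at *; omega)
            · simpa using hr
            rcases hd with ⟨j, hj, hjw⟩ | ⟨m, hm1, hm2, hm3⟩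
            · refine Or.inl ⟨j, hj, ?_⟩
              first
              | omega
              | (simp only [List.length_cons] at *; omega)
            · cases m with
              | zero => exact absurd (by simpa using hm2) hl
              | succ m =>
                refine Or.inr ⟨m, ?_, ?_, ?_⟩
                · first
                  | omega
                  | (simp only [List.length_cons] at *; omega)
                · simpa using hm2
                · first
                  | omega
                  | (simp only [List.length_cons] at *; omega)

lemma pvB_iff (tokens : List String) (left right : String) (window : Int) :
    tokens_within_window_py_alt tokens left right window = true ↔
      pvPairSpec tokens left right window := by
  unfold tokens_within_window_py_alt pvPairSpec
  rw [pvLoopB_iff left right window tokens 0 none (by simp)]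
  constructor
  · rintro ⟨k, hk, hr, hd⟩
    rcases hd with ⟨j, hj, _⟩ | hd
    · exact absurd hj (by simp)
    · exact ⟨k, hk, hr, hd⟩
  · rintro ⟨k, hk, hr, hd⟩
    exact ⟨k, hk, hr, Or.inr hd⟩

-- ===== VERDICT (by name: the statement is the Claim_ definition above) =====
theorem tokens_within_window_py_spec : Claim_equal_tokens_within_window_py := by
  intro tokens left right window _
  unfold Spec_tokens_within_window_py
  have h := (pvA_iff tokens left right window).trans (pvB_iff tokens left right window).symm
  exact Bool.coe_iff_coe.mp h
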